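-- pv_equiv track=rewrite | github.com/waynebhayes/SANA | scripts/multi/EGS_SGS.py | go_tower_calc
-- ===== SOURCE A (Python) =====
-- from collections import defaultdict
--
-- def go_tower_calc(pgo, aligs, k):
--     visited_gos = set()
--     go_lambda_created = {i: {} for i in range(k)}
--     go_stuff = defaultdict(lambda: [-1])
--     for i in range(len(aligs)):
--         for j, pr in enumerate(aligs[i]):
--             if pr == '_':
--                 continue
--             if pr not in pgo[j]:
--                 continue
--             for go in pgo[j][pr]:
--                 if go not in visited_gos:
--                     for intel in range(k):
--                         go_lambda_created[intel][go] = 0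
--                     visited_gos.add(go)
--                 go_lambda_created[j][go] += 1
--                 if go_stuff[go][0] == i:
--                     go_stuff[go][-1] += 1
--                 else:
--                     go_stuff[go][0] = i
--                     go_stuff[go].append(1)
--
--     return {key: val[1:] for key, val in go_stuff.items()}, go_lambda_created
-- ===== SOURCE B (Python) =====
-- from collections import Counter
--
-- def go_tower_calc(pgo, aligs, k):
--     # Stage 1: flatten the nested scan into one ordered stream of (go, i, j) events.
--     events = [(go, i, j)
--               for i, alig in enumerate(aligs)
--               for j, pr in enumerate(alig)
--               if pr != '_' and pr in pgo[j]
--               for go in pgo[j][pr]]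
--     # Stage 2: bulk counting — no incremental per-go state, no visited set.
--     order = list(dict.fromkeys(go for go, _, _ in events))   # gos in first-seen order
--     by_alig = Counter((go, i) for go, i, _ in events)
--     by_pos = Counter((go, j) for go, _, j in events)
--     # Stage 3: reshape the counters into the two tables.
--     first = {go: [by_alig[(go, i)] for i in range(len(aligs)) if (go, i) in by_alig]
--              for go in order}
--     second = {j: {go: by_pos[(go, j)] for go in order} for j in range(k)}
--     return first, second
-- ===== Notes on version B (the rewrite author's own statement) =====
-- stated objective: alternative
-- what changed: B replaces A's single on-line pass with incremental per-go state (visited set, zero-filled nested dict, defaultdict of sentinel run-lists mutated in place) by staged bulk counting: it flattens the scan into an event stream, counts (go, alignment) and (go, position) pairs with two Counters, and reshapes those counters plus a first-seen key order into the two tables by comprehensions.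
import Mathlib
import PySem

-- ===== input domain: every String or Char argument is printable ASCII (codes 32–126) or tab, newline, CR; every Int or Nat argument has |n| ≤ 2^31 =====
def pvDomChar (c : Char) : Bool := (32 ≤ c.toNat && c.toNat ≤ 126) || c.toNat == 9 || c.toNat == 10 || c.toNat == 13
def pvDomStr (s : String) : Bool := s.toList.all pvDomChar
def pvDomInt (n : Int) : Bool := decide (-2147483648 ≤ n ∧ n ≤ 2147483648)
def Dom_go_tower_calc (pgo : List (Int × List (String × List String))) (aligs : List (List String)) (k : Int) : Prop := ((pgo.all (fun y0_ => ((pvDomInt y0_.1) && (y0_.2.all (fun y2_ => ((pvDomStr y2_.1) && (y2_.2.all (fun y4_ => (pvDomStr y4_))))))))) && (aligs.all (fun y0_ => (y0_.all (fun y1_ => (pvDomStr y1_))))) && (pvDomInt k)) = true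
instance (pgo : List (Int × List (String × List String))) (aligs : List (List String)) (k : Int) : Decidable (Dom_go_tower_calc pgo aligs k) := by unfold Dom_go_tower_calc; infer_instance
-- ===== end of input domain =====

-- B re-implements A's on-line aggregation (visited set + sentinel run-lists mutated in place) as
-- staged bulk counting: an event stream, two Counters over (go, alignment) / (go, position) pairs,
-- and a final reshape into the two tables; same cost, no incremental per-go state.


-- ===== PORT A =====
-- Body of Python A's inner 'for go in pgo[j][pr]' loop.  'val[0] = i' and 'val[-1] += 1' are
-- hand-ported as 'i :: cur.tail' and 'cur.dropLast ++ [last + 1]': exact, because the run-list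
-- is never empty (it is created as [-1]), so Python's IndexError branch is unreachable.
def goStepA (k i j : Int)
    (st : PySem.Set String × PySem.Dict Int (PySem.Dict String Int) × PySem.Dict String (List Int))
    (go : String) :
    PySem.Set String × PySem.Dict Int (PySem.Dict String Int) × PySem.Dict String (List Int) :=
  let visited := st.1
  let glc := st.2.1
  let stuff := st.2.2
  -- if go not in visited: zero-fill go_lambda_created[·][go]; visited.add(go)
  let vg :=
    if PySem.Set.contains visited go then (visited, glc)
    else (PySem.Set.add visited go,
          (PySem.List.pyRange 0 k 1).foldl
            (fun g intel => g.modify intel (PySem.Dict.mk []) (fun inner => inner.insert go 0)) glc)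
  let visited := vg.1
  let glc := vg.2
  -- go_lambda_created[j][go] += 1   (j and go are present keys on every input Pre_ admits)
  let glc := glc.modify j (PySem.Dict.mk []) (fun inner => inner.modify go 0 (· + 1))
  -- go_stuff[go] with defaultdict default [-1]
  let cur := stuff.getD go [-1]
  let stuff :=
    if PySem.List.pyGetD cur 0 0 == i then
      stuff.insert go (cur.dropLast ++ [PySem.List.pyGetD cur (-1) 0 + 1])  -- val[-1] += 1
    else
      stuff.insert go ((i :: cur.tail) ++ [1])                              -- val[0] = i; val.append(1)
  (visited, glc, stuff)

-- Python A's per-alignment loop 'for j, pr in enumerate(aligs[i])'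
def goRowA (k i : Int) (pgoD : PySem.Dict Int (List (String × List String)))
    (st : PySem.Set String × PySem.Dict Int (PySem.Dict String Int) × PySem.Dict String (List Int))
    (row : List String) :
    PySem.Set String × PySem.Dict Int (PySem.Dict String Int) × PySem.Dict String (List Int) :=
  (PySem.List.enumerate row).foldl
    (fun st jp =>
      if jp.2 == "_" then st                                -- if pr == '_': continue
      else
        let d := PySem.Dict.mk (pgoD.getD jp.1 [])          -- pgo[j] (a present key under Pre_)
        if d.contains jp.2 then (d.getD jp.2 []).foldl (goStepA k i jp.1) st
        else st)                                            -- if pr not in pgo[j]: continue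
    st

def go_tower_calc (pgo : List (Int × List (String × List String))) (aligs : List (List String)) (k : Int) : (List (String × List Int)) × (List (Int × List (String × Int))) :=
  let pgoD := PySem.Dict.mk pgo
  let glc0 : PySem.Dict Int (PySem.Dict String Int) :=
    (PySem.List.pyRange 0 k 1).foldl (fun d i => d.insert i (PySem.Dict.mk [])) (PySem.Dict.mk [])
  let fin :=
    (PySem.List.pyRange 0 (aligs.length : Int) 1).foldl
      (fun st i => goRowA k i pgoD st (PySem.List.pyGetD aligs i []))
      ((PySem.Set.empty : PySem.Set String), glc0, (PySem.Dict.mk ([] : List (String × List Int))))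
  (fin.2.2.items.map (fun kv => (kv.1, PySem.List.slice kv.2 (some 1) none)),
   fin.2.1.items.map (fun kv => (kv.1, kv.2.items)))

-- ===== PORT B =====
def go_tower_calc_alt (pgo : List (Int × List (String × List String))) (aligs : List (List String)) (k : Int) : (List (String × List Int)) × (List (Int × List (String × Int))) :=
  let pgoD := PySem.Dict.mk pgo
  -- Stage 1: the ordered stream of (go, i, j) events
  let events : List (String × Int × Int) :=
    (PySem.List.enumerate aligs).flatMap (fun ia =>
      (PySem.List.enumerate ia.2).flatMap (fun jp =>
        let d := PySem.Dict.mk (pgoD.getD jp.1 [])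
        if jp.2 ≠ "_" ∧ d.contains jp.2 = true
        then (d.getD jp.2 []).map (fun go => (go, ia.1, jp.1))
        else []))
  -- Stage 2: bulk counting — list(dict.fromkeys(..)) and two Counters
  let order := PySem.List.dedup (events.map (fun e => e.1))
  let byAlig := PySem.Dict.counter (events.map (fun e => (e.1, e.2.1)))
  let byPos := PySem.Dict.counter (events.map (fun e => (e.1, e.2.2)))
  -- Stage 3: reshape.  Both dict comprehensions run over distinct keys (a range / first-seen
  -- distinct gos), so each dict is literally its association list.  'by_alig[(go,i)]' is guarded
  -- by the 'in' test; 'by_pos[(go,j)]' is a Counter lookup, 0 when absent — both are getD.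
  (order.map (fun go =>
     (go, ((PySem.List.pyRange 0 (aligs.length : Int) 1).filter
             (fun i => byAlig.contains (go, i))).map (fun i => byAlig.getD (go, i) 0))),
   (PySem.List.pyRange 0 k 1).map (fun j =>
     (j, order.map (fun go => (go, byPos.getD (go, j) 0)))))

-- ===== PRECONDITION & SPEC =====
-- One cell (j, pr) of an alignment is safe iff pgo has the key j and, whenever pr maps to a
-- non-empty GO list there, j < k (otherwise Python A hits a KeyError).
def preCell (pgoD : PySem.Dict Int (List (String × List String))) (kk : Int) (jp : Int × String) : Bool :=
  match pgoD.get? jp.1 with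
  | none => false
  | some d =>
    match (PySem.Dict.mk d).get? jp.2 with
    | none => true
    | some gos => gos.isEmpty || decide (jp.1 < kk)

-- Pre_ excludes exactly the inputs on which Python A raises KeyError: a non-'_' cell whose
-- position j is not a key of pgo, or which produces a GO event at a position j ≥ k.
def Pre_go_tower_calc (pgo : List (Int × List (String × List String))) (aligs : List (List String)) (k : Int) : Prop :=
  ∀ alig ∈ aligs, ∀ jp ∈ PySem.List.enumerate alig, jp.2 ≠ "_" → preCell (PySem.Dict.mk pgo) k jp = true
instance (pgo : List (Int × List (String × List String))) (aligs : List (List String)) (k : Int) : Decidable (Pre_go_tower_calc pgo aligs k) := by unfold Pre_go_tower_calc; infer_instance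

def pvWitness_go_tower_calc : (List (Int × List (String × List String))) × List (List String) × Int :=
  ([(0, [("p", ["g1", "g2"])]), (1, [("q", ["g1"])])], [["p", "q"], ["p", "_"]], 2)

def Spec_go_tower_calc (pgo : List (Int × List (String × List String))) (aligs : List (List String)) (k : Int) (out : (List (String × List Int)) × (List (Int × List (String × Int)))) : Prop := out = go_tower_calc_alt pgo aligs k
instance (pgo : List (Int × List (String × List String))) (aligs : List (List String)) (k : Int) (out : (List (String × List Int)) × (List (Int × List (String × Int)))) : Decidable (Spec_go_tower_calc pgo aligs k out) := by unfold Spec_go_tower_calc; infer_instance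

-- ===== CLAIM (what is proved, stated in full; the proofs are below) =====
def Claim_equal_go_tower_calc : Prop := ∀ (pgo : List (Int × List (String × List String))) (aligs : List (List String)) (k : Int), Dom_go_tower_calc pgo aligs k → Pre_go_tower_calc pgo aligs k → Spec_go_tower_calc pgo aligs k (go_tower_calc pgo aligs k)

-- ===== LEMMAS AND PROOFS =====

abbrev StA := PySem.Set String × PySem.Dict Int (PySem.Dict String Int) × PySem.Dict String (List Int)
abbrev StB := PySem.Dict String (PySem.Dict Int Int) × PySem.Dict Int (PySem.Dict String Int)
abbrev Ev := String × Int × Int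

-- ---------- the reference aggregation step (proof-side): one event into a dict-of-dicts state ----------
def refStep (k : Int) (st : StB) (ev : Ev) : StB :=
  let go := ev.1
  let i := ev.2.1
  let j := ev.2.2
  let counts := st.1
  let lam := st.2
  let cl :=
    match counts.get? go with
    | some _ => (counts, lam)
    | none => (counts.insert go (PySem.Dict.mk []),
               (PySem.List.pyRange 0 k 1).foldl
                 (fun g intel => g.modify intel (PySem.Dict.mk []) (fun inner => inner.insert go 0)) lam)
  let counts := cl.1
  let lam := cl.2
  let per := counts.getD go (PySem.Dict.mk [])
  let counts := counts.insert go (per.insert i (per.getD i 0 + 1))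
  let lam := lam.modify j (PySem.Dict.mk []) (fun inner => inner.modify go 0 (· + 1))
  (counts, lam)

-- A's inner-loop body, re-keyed by a whole event (go, i, j)
def stepAe (k : Int) (st : StA) (ev : Ev) : StA := goStepA k ev.2.1 ev.2.2 st ev.1

-- the run-list A keeps per GO term, read off the reference per-alignment counter dict
def tagOf (per : PySem.Dict Int Int) : List Int := (per.items.map (·.1)).getLastD 0 :: per.values

-- one alignment's worth of the event stream
def rowEvents (pgoD : PySem.Dict Int (List (String × List String))) (i : Int) (row : List String) :
    List Ev :=
  (PySem.List.enumerate row).flatMap (fun jp =>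
    let d := PySem.Dict.mk (pgoD.getD jp.1 [])
    if jp.2 ≠ "_" ∧ d.contains jp.2 = true
    then (d.getD jp.2 []).map (fun go => (go, i, jp.1))
    else [])

def evStream (pgo : List (Int × List (String × List String))) (aligs : List (List String)) : List Ev :=
  (PySem.List.enumerate aligs).flatMap (fun ia => rowEvents (PySem.Dict.mk pgo) ia.1 ia.2)

def lam0 (k : Int) : PySem.Dict Int (PySem.Dict String Int) :=
  (PySem.List.pyRange 0 k 1).foldl (fun d i => d.insert i (PySem.Dict.mk [])) (PySem.Dict.mk [])

-- simulation invariant: A's state is the reference state reshaped; all alignment keys so far ≤ bound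
def SimInv (bound : Int) (sA : StA) (sB : StB) : Prop :=
  sA.2.1 = sB.2 ∧
  (∀ go, PySem.Set.contains sA.1 go = sB.1.contains go) ∧
  sA.2.2.items = sB.1.items.map (fun kv => (kv.1, tagOf kv.2)) ∧
  (∀ kv ∈ sB.1.items, kv.2.items ≠ [] ∧ (kv.2.items.map (·.1)).Pairwise (· < ·) ∧
      ∀ x ∈ kv.2.items.map (·.1), x ≤ bound)

lemma Inv_mono {b b' : Int} (h : b ≤ b') {sA : StA} {sB : StB} (hi : SimInv b sA sB) :
    SimInv b' sA sB := by
  obtain ⟨h1, h2, h3, h4⟩ := hi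
  refine ⟨h1, h2, h3, fun kv hkv => ?_⟩
  obtain ⟨p1, p2, p3⟩ := h4 kv hkv
  exact ⟨p1, p2, fun x hx => le_trans (p3 x hx) h⟩

lemma get?_items_map {kappa nu nu' : Type} [BEq kappa] (f : nu → nu') (l : List (kappa × nu)) (x : kappa) :
    (PySem.Dict.mk (l.map (fun kv => (kv.1, f kv.2)))).get? x = ((PySem.Dict.mk l).get? x).map f := by
  induction l with
  | nil => rfl
  | cons a t ih =>
    obtain ⟨k0, v0⟩ := a
    simp only [List.map_cons, PySem.Dict.get?_mk_cons]
    split <;> simp [ih]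

lemma getLastD_cons_ne_nil {α : Type} (a : α) {t : List α} (h : t ≠ []) (d : α) :
    (a :: t).getLastD d = t.getLastD d := by
  cases t with
  | nil => exact absurd rfl h
  | cons b t' => simp [List.getLastD_eq_getLast?, List.getLast?_cons_cons]

lemma getLast_eq_getLastD {α : Type} (l : List α) (h : l ≠ []) (d : α) :
    l.getLast h = l.getLastD d := by
  induction l with
  | nil => exact absurd rfl h
  | cons a t ih =>
    cases t with
    | nil => simp
    | cons b t' =>
      rw [List.getLast_cons (by simp), ih (by simp), getLastD_cons_ne_nil a (by simp) d]

lemma getLastD_mem {α : Type} {l : List α} (h : l ≠ []) (d : α) : l.getLastD d ∈ l := by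
  induction l with
  | nil => exact absurd rfl h
  | cons a t ih =>
    cases ht : t with
    | nil => simp
    | cons b t' =>
      rw [getLastD_cons_ne_nil a (by simp) d]
      exact List.mem_cons_of_mem a (ht ▸ ih (by simp [ht]))

lemma getLastD_map {α β : Type} (f : α → β) {l : List α} (h : l ≠ []) (d : α) :
    (l.map f).getLastD (f d) = f (l.getLastD d) := by
  induction l generalizing d with
  | nil => exact absurd rfl h
  | cons a t ih =>
    cases ht : t with
    | nil => simp
    | cons b t' =>
      subst ht
      rw [List.map_cons, getLastD_cons_ne_nil (f a) (by simp) (f d),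
          getLastD_cons_ne_nil a (by simp) d]
      exact ih (by simp) d

lemma le_getLastD_of_pairwise {l : List Int} (h : l.Pairwise (· < ·)) :
    ∀ x ∈ l, x ≤ l.getLastD 0 := by
  induction l with
  | nil => simp
  | cons a t ih =>
    rw [List.pairwise_cons] at h
    intro x hx
    cases ht : t with
    | nil =>
      subst ht
      simp only [List.mem_singleton] at hx
      simp [hx]
    | cons b t' =>
      subst ht
      rw [getLastD_cons_ne_nil a (by simp) 0]
      rcases List.mem_cons.mp hx with hxa | hxt
      · subst hxa
        exact le_of_lt (h.1 _ (getLastD_mem (by simp) 0))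
      · exact ih h.2 x hxt

lemma get?_of_pairwise_last (l : List (Int × Int)) (h : l ≠ []) (i : Int)
    (hp : (l.map (·.1)).Pairwise (· < ·)) (hlast : (l.map (·.1)).getLastD 0 = i) :
    (PySem.Dict.mk l).get? i = some ((l.getLastD (0, 0)).2) := by
  induction l with
  | nil => exact absurd rfl h
  | cons a t ih =>
    obtain ⟨k0, v0⟩ := a
    rw [List.map_cons, List.pairwise_cons] at hp
    cases ht : t with
    | nil =>
      subst ht
      simp only [List.map_cons, List.map_nil] at hlast
      simp at hlast
      simp [PySem.Dict.get?_mk_cons, hlast]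
    | cons b t' =>
      subst ht
      rw [List.map_cons] at hlast
      rw [getLastD_cons_ne_nil _ (by simp) 0] at hlast
      have hk0 : k0 ≠ i := by
        have := hp.1 _ (getLastD_mem (l := ((b :: t').map (·.1))) (by simp) 0)
        omega
      rw [PySem.Dict.get?_mk_cons, if_neg (by simp [hk0]),
          getLastD_cons_ne_nil _ (by simp) (0, 0)]
      exact ih (by simp) hp.2 hlast

lemma map_replace_last (l : List (Int × Int)) (hl : l ≠ []) (i nv : Int)
    (hp : (l.map (·.1)).Pairwise (· < ·)) (hlast : (l.map (·.1)).getLastD 0 = i) :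
    l.map (fun p => if p.1 == i then (i, nv) else p) = l.dropLast ++ [(i, nv)] := by
  induction l with
  | nil => exact absurd rfl hl
  | cons a t ih =>
    rw [List.map_cons, List.pairwise_cons] at hp
    cases ht : t with
    | nil =>
      subst ht
      simp only [List.map_cons, List.map_nil] at hlast
      simp at hlast
      simp [hlast]
    | cons b t' =>
      subst ht
      rw [List.map_cons] at hlast
      rw [getLastD_cons_ne_nil _ (by simp) 0] at hlast
      have ha : a.1 ≠ i := by
        have := hp.1 _ (getLastD_mem (l := ((b :: t').map (·.1))) (by simp) 0)
        omega
      rw [List.map_cons, if_neg (by simp [ha]), List.dropLast_cons_of_ne_nil (by simp),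
          List.cons_append, ih (by simp) hp.2 hlast]

-- the one-event simulation step
lemma stepInv (k bound : Int) (hb : 0 ≤ bound) (ev : Ev) (hev : ev.2.1 = bound)
    (sA : StA) (sB : StB) (h : SimInv bound sA sB) :
    SimInv bound (stepAe k sA ev) (refStep k sB ev) := by
  obtain ⟨go, i, j⟩ := ev
  obtain ⟨vis, glc, stuff⟩ := sA
  obtain ⟨counts, lam⟩ := sB
  obtain ⟨hglc, hvis, hitems, hper⟩ := h
  simp only at hev hglc hvis hitems hper
  subst hev
  have hstuff : stuff = PySem.Dict.mk (counts.items.map (fun kv => (kv.1, tagOf kv.2))) :=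
    PySem.Dict.ext hitems
  have hget : stuff.get? go = (counts.get? go).map tagOf := by
    rw [hstuff, get?_items_map]
  simp only [stepAe, goStepA, refStep]
  cases hc : counts.get? go with
  | none =>
    have hcont : counts.contains go = false := by
      rw [PySem.Dict.contains_eq_isSome_get?, hc]; rfl
    have hvg : PySem.Set.contains vis go = false := by rw [hvis, hcont]
    have hsg : stuff.get? go = none := by rw [hget, hc]; rfl
    have hscont : stuff.contains go = false := by
      rw [PySem.Dict.contains_eq_isSome_get?, hsg]; rfl
    have hcur : stuff.getD go [-1] = [-1] := by
      rw [PySem.Dict.getD_eq_get?_getD, hsg]; rfl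
    have hne1 : (PySem.List.pyGetD ([-1] : List Int) 0 0 == i) = false := by
      have h0 : PySem.List.pyGetD ([-1] : List Int) 0 0 = -1 := rfl
      rw [h0, beq_eq_false_iff_ne]
      omega
    simp only [hvg, hcur, hne1, Bool.false_eq_true, if_false]
    have hb1 : (counts.insert go (PySem.Dict.mk [])).getD go (PySem.Dict.mk []) = PySem.Dict.mk [] :=
      PySem.Dict.getD_insert_self _ _ _ _
    rw [hb1]
    have hb2 : ((PySem.Dict.mk ([] : List (Int × Int))).insert i
        ((PySem.Dict.mk ([] : List (Int × Int))).getD i 0 + 1)) = PySem.Dict.mk [(i, 1)] := by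
      rfl
    rw [hb2, PySem.Dict.insert_insert_self]
    have hAins : (stuff.insert go ((i :: ([-1] : List Int).tail) ++ [1])).items
        = stuff.items ++ [(go, [i, 1])] := by
      rw [PySem.Dict.items_insert_of_not_contains _ _ hscont]; rfl
    have hBins : (counts.insert go (PySem.Dict.mk [(i, 1)])).items
        = counts.items ++ [(go, PySem.Dict.mk [(i, 1)])] :=
      PySem.Dict.items_insert_of_not_contains _ _ hcont
    refine ⟨by rw [hglc], ?_, ?_, ?_⟩
    · intro x
      have hva : PySem.Set.add vis go = vis ++ [go] := by
        simp only [PySem.Set.add, hvg, Bool.false_eq_true, if_false]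
      rw [hva, PySem.Dict.contains_insert]
      have hx := hvis x
      simp only [PySem.Set.contains] at hx ⊢
      rw [List.contains_append, hx]
      by_cases hxy : x = go
      · simp [hxy]
      · simp [hxy, Bool.or_comm]
    · rw [hAins, hBins, List.map_append, hitems]
      rfl
    · intro kv hkv
      rw [hBins, List.mem_append] at hkv
      rcases hkv with hkv | hkv
      · exact hper kv hkv
      · simp only [List.mem_singleton] at hkv
        subst hkv
        refine ⟨by simp, by simp, by simp⟩
  | some per =>
    have hcont : counts.contains go = true := by
      rw [PySem.Dict.contains_eq_isSome_get?, hc]; rfl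
    have hvg : PySem.Set.contains vis go = true := by rw [hvis, hcont]
    have hsg : stuff.get? go = some (tagOf per) := by rw [hget, hc]; rfl
    have hscont : stuff.contains go = true := by
      rw [PySem.Dict.contains_eq_isSome_get?, hsg]; rfl
    have hcur : stuff.getD go [-1] = tagOf per := by
      rw [PySem.Dict.getD_eq_get?_getD, hsg]; rfl
    have hpmem : (go, per) ∈ counts.items := PySem.Dict.mem_items_of_get?_eq_some _ hc
    obtain ⟨hpne, hppw, hple⟩ := hper _ hpmem
    dsimp only at hpne hppw hple
    have hperD : counts.getD go (PySem.Dict.mk []) = per := PySem.Dict.getD_of_get?_eq_some _ _ hc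
    have hvne : per.values ≠ [] := by
      intro hh
      exact hpne (List.map_eq_nil_iff.mp hh)
    have hkne : per.items.map (·.1) ≠ [] := by
      intro hh
      exact hpne (List.map_eq_nil_iff.mp hh)
    have hcur0 : PySem.List.pyGetD (tagOf per) 0 0 = (per.items.map (·.1)).getLastD 0 := by
      simp [tagOf, PySem.List.pyGetD_zero_cons]
    simp only [hvg, hcur, hcur0, hperD, if_true]
    -- the new per-GO dict on the reference side and the new run list on A's side agree
    have hmain : ∀ newcur newper,
        newcur = tagOf newper →
        (newper.items ≠ [] ∧ (newper.items.map (·.1)).Pairwise (· < ·) ∧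
          ∀ x ∈ newper.items.map (·.1), x ≤ i) →
        SimInv i
          (vis, glc.modify j (PySem.Dict.mk []) (fun inner => inner.modify go 0 (· + 1)),
            stuff.insert go newcur)
          (counts.insert go newper,
            lam.modify j (PySem.Dict.mk []) (fun inner => inner.modify go 0 (· + 1))) := by
      intro newcur newper hnc hfacts
      refine ⟨by rw [hglc], ?_, ?_, ?_⟩
      · intro x
        rw [PySem.Dict.contains_insert, hvis x]
        by_cases hx : x = go
        · subst hx
          simp [hcont]
        · simp [hx]
      · rw [PySem.Dict.items_insert_of_contains _ _ hscont,
            PySem.Dict.items_insert_of_contains _ _ hcont, hitems,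
            List.map_map, List.map_map]
        apply List.map_congr_left
        intro p _
        by_cases hp : p.1 = go
        · simp [Function.comp, hp, hnc]
        · simp [Function.comp, hp]
      · intro kv hkv
        rcases (PySem.Dict.mem_items_insert _ _ _ _).mp hkv with hkv | hkv
        · subst hkv
          exact hfacts
        · exact hper kv hkv.1
    by_cases hlkb : (per.items.map (·.1)).getLastD 0 = i
    · -- a repeat event in the same alignment: bump the last counter
      have hgl : per.get? i = some ((per.items.getLastD (0, 0)).2) :=
        get?_of_pairwise_last per.items hpne i hppw hlkb
      have hgD : per.getD i 0 = (per.items.getLastD (0, 0)).2 :=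
        PySem.Dict.getD_of_get?_eq_some _ _ hgl
      have hpcont : per.contains i = true := by
        rw [PySem.Dict.contains_eq_isSome_get?, hgl]; rfl
      have hIns : (per.insert i (per.getD i 0 + 1)).items
          = per.items.dropLast ++ [(i, (per.items.getLastD (0, 0)).2 + 1)] := by
        rw [PySem.Dict.items_insert_of_contains _ _ hpcont, hgD]
        exact map_replace_last per.items hpne i _ hppw hlkb
      rw [hlkb]
      simp only [BEq.rfl, if_true]
      apply hmain
      · -- run list equality
        have hlastv : PySem.List.pyGetD (tagOf per) (-1) 0 = (per.items.getLastD (0, 0)).2 := by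
          rw [PySem.List.pyGetD_neg_one (tagOf per) 0 (by simp [tagOf])]
          rw [getLast_eq_getLastD (tagOf per) (by simp [tagOf]) 0]
          simp only [tagOf]
          rw [getLastD_cons_ne_nil _ hvne 0]
          exact getLastD_map (fun p : Int × Int => p.2) hpne (0, 0)
        rw [hlastv]
        simp only [tagOf, PySem.Dict.values, hIns, List.map_append, List.map_dropLast,
          List.map_cons, List.map_nil]
        rw [List.getLastD_concat,
          List.dropLast_cons_of_ne_nil (by simpa [PySem.Dict.values] using hvne), hlkb]
        rfl
      · -- invariant facts for the bumped dict
        have hkeys : (per.items.dropLast ++ [(i, (per.items.getLastD (0, 0)).2 + 1)]).map (·.1)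
            = per.items.map (·.1) := by
          rw [List.map_append, List.map_dropLast]
          have hdec : (per.items.map (·.1)).dropLast ++ [(per.items.map (·.1)).getLastD 0]
              = per.items.map (·.1) := by
            rw [← getLast_eq_getLastD _ hkne 0]
            exact List.dropLast_append_getLast hkne
          rw [← hlkb]
          simpa using hdec
        rw [hIns]
        refine ⟨by simp, ?_, ?_⟩
        · rw [hkeys]; exact hppw
        · rw [hkeys]; exact hple
    · -- first event of this alignment for this GO term: start a new run entry
      have hnotmem : i ∉ per.items.map (·.1) := by
        intro hmem
        have h1 := le_getLastD_of_pairwise hppw _ hmem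
        have h2 := hple _ (getLastD_mem hkne 0)
        omega
      have hpg : per.get? i = none := by
        rw [PySem.Dict.get?_eq_none_iff_not_mem_keys]
        simpa [PySem.Dict.keys] using hnotmem
      have hgD : per.getD i 0 = 0 := by
        rw [PySem.Dict.getD_eq_get?_getD, hpg]; rfl
      have hpcont : per.contains i = false := by
        rw [PySem.Dict.contains_eq_isSome_get?, hpg]; rfl
      have hIns : (per.insert i (per.getD i 0 + 1)).items
          = per.items ++ [(i, 1)] := by
        rw [PySem.Dict.items_insert_of_not_contains _ _ hpcont, hgD]
        norm_num
      have hbeq : ((per.items.map (·.1)).getLastD 0 == i) = false := by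
        rw [beq_eq_false_iff_ne]
        exact hlkb
      rw [hbeq]
      simp only [Bool.false_eq_true, if_false]
      apply hmain
      · simp only [tagOf, PySem.Dict.values, hIns, List.map_append, List.map_cons,
          List.map_nil, List.getLastD_concat, List.tail_cons]
        rfl
      · rw [hIns]
        refine ⟨by simp, ?_, ?_⟩
        · rw [List.map_append]
          rw [List.pairwise_append]
          refine ⟨hppw, by simp, ?_⟩
          intro x hx y hy
          simp only [List.map_cons, List.map_nil, List.mem_singleton] at hy
          rw [hy]
          have h1 := hple x hx
          have h2 : x ≠ i := fun hxx => hnotmem (hxx ▸ hx)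
          omega
        · rw [List.map_append]
          intro x hx
          rcases List.mem_append.mp hx with hx | hx
          · exact hple x hx
          · simp only [List.map_cons, List.map_nil, List.mem_singleton] at hx
            omega

lemma rowInv (k bound : Int) (hb : 0 ≤ bound) (evs : List Ev)
    (hev : ∀ ev ∈ evs, ev.2.1 = bound) :
    ∀ (sA : StA) (sB : StB), SimInv bound sA sB →
      SimInv bound (evs.foldl (stepAe k) sA) (evs.foldl (refStep k) sB) := by
  induction evs with
  | nil => intro sA sB h; exact h
  | cons e t ih =>
    intro sA sB h
    simp only [List.foldl_cons]
    exact ih (fun ev hev' => hev ev (List.mem_cons_of_mem e hev'))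
      _ _ (stepInv k bound hb e (hev e List.mem_cons_self) sA sB h)

lemma rowEvents_i (pgoD : PySem.Dict Int (List (String × List String))) (i : Int)
    (row : List String) : ∀ ev ∈ rowEvents pgoD i row, ev.2.1 = i := by
  intro ev hev
  simp only [rowEvents, List.mem_flatMap] at hev
  obtain ⟨jp, _, hev⟩ := hev
  split at hev
  · rcases List.mem_map.mp hev with ⟨go, _, rfl⟩
    rfl
  · exact absurd hev List.not_mem_nil

lemma rowA_eq (k : Int) (pgoD : PySem.Dict Int (List (String × List String))) (i : Int)
    (row : List String) (st : StA) :
    goRowA k i pgoD st row = (rowEvents pgoD i row).foldl (stepAe k) st := by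
  rw [goRowA, rowEvents, List.foldl_flatMap]
  apply PySem.List.foldl_congr_mem
  intro acc jp _
  by_cases h1 : jp.2 = "_"
  · simp [h1]
  · have h1' : (jp.2 == "_") = false := by
      rw [beq_eq_false_iff_ne]; exact h1
    rw [h1']
    simp only [Bool.false_eq_true, if_false]
    by_cases h2 : (PySem.Dict.mk (pgoD.getD jp.1 [])).contains jp.2 = true
    · rw [if_pos h2, if_pos ⟨h1, h2⟩, List.foldl_map]
      rfl
    · rw [if_neg h2, if_neg (by intro hh; exact h2 hh.2)]
      rfl

lemma outerInv (k : Int) (pgoD : PySem.Dict Int (List (String × List String))) :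
    ∀ (als : List (List String)) (s : Int), 0 ≤ s →
      ∀ (sA : StA) (sB : StB), SimInv s sA sB →
      SimInv (s + als.length)
        ((PySem.List.enumerate als s).foldl
          (fun st ia => (rowEvents pgoD ia.1 ia.2).foldl (stepAe k) st) sA)
        ((PySem.List.enumerate als s).foldl
          (fun st ia => (rowEvents pgoD ia.1 ia.2).foldl (refStep k) st) sB) := by
  intro als
  induction als with
  | nil =>
    intro s hs sA sB h
    simpa [PySem.List.enumerate] using Inv_mono (by simp) h
  | cons a t ih =>
    intro s hs sA sB h
    rw [PySem.List.enumerate_cons]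
    simp only [List.foldl_cons]
    have h1 := rowInv k s hs (rowEvents pgoD s a) (rowEvents_i pgoD s a) sA sB h
    have h2 := Inv_mono (by omega : s ≤ s + 1) h1
    have h3 := ih (s + 1) (by omega) _ _ h2
    have h5 : (((a :: t).length : Nat) : Int) = (t.length : Int) + 1 := by simp
    exact Inv_mono (le_of_eq (by rw [h5]; ring)) h3

-- A's result is the reference fold over the event stream, reshaped
lemma A_eq (pgo : List (Int × List (String × List String))) (aligs : List (List String)) (k : Int) :
    go_tower_calc pgo aligs k =
      (((evStream pgo aligs).foldl (refStep k)
          ((PySem.Dict.mk ([] : List (String × PySem.Dict Int Int))), lam0 k)).1.items.map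
            (fun kv => (kv.1, kv.2.values)),
       ((evStream pgo aligs).foldl (refStep k)
          ((PySem.Dict.mk ([] : List (String × PySem.Dict Int Int))), lam0 k)).2.items.map
            (fun kv => (kv.1, kv.2.items))) := by
  simp only [go_tower_calc]
  rw [evStream, List.foldl_flatMap]
  have hAeq :
      (PySem.List.pyRange 0 (aligs.length : Int) 1).foldl
        (fun st i => goRowA k i (PySem.Dict.mk pgo) st (PySem.List.pyGetD aligs i []))
        ((PySem.Set.empty : PySem.Set String), lam0 k,
          (PySem.Dict.mk ([] : List (String × List Int))))
      = (PySem.List.enumerate aligs).foldl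
          (fun st ia => (rowEvents (PySem.Dict.mk pgo) ia.1 ia.2).foldl (stepAe k) st)
          ((PySem.Set.empty : PySem.Set String), lam0 k,
            (PySem.Dict.mk ([] : List (String × List Int)))) := by
    rw [PySem.List.enumerate_eq_map_pyRange aligs ([] : List String), List.foldl_map]
    simp only [PySem.List.len]
    apply PySem.List.foldl_congr_mem
    intro acc i _
    exact rowA_eq k (PySem.Dict.mk pgo) i (PySem.List.pyGetD aligs i []) acc
  rw [show ((PySem.List.pyRange 0 k 1).foldl (fun d i => d.insert i (PySem.Dict.mk []))
        (PySem.Dict.mk [])) = lam0 k from rfl, hAeq]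
  have hInit : SimInv 0
      ((PySem.Set.empty : PySem.Set String), lam0 k,
        (PySem.Dict.mk ([] : List (String × List Int))))
      ((PySem.Dict.mk ([] : List (String × PySem.Dict Int Int))), lam0 k) := by
    refine ⟨rfl, fun go => rfl, rfl, by simp⟩
  have hFin := outerInv k (PySem.Dict.mk pgo) aligs 0 (le_refl 0) _ _ hInit
  obtain ⟨hglc, -, hitems, -⟩ := hFin
  refine Prod.ext ?_ ?_
  · simp only
    rw [hitems, List.map_map]
    exact List.map_congr_left (fun kv _ => by
      simp only [Function.comp, tagOf, PySem.List.slice_from_one, List.tail_cons])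
  · simp only
    rw [hglc]

-- ---------- closed-form characterization of the reference fold ----------

def cntI (E : List Ev) (go : String) (i : Int) : Int :=
  ((E.map (fun e => (e.1, e.2.1))).count (go, i) : Int)

def cntJ (E : List Ev) (go : String) (j : Int) : Int :=
  ((E.map (fun e => (e.1, e.2.2))).count (go, j) : Int)

def gosOf (E : List Ev) : List String := PySem.List.dedup (E.map (fun e => e.1))

def isOf (E : List Ev) (go : String) : List Int :=
  (E.filter (fun e => e.1 == go)).map (fun e => e.2.1)

def perItems (E : List Ev) (go : String) : List (Int × Int) :=
  (PySem.List.dedup (isOf E go)).map (fun i => (i, cntI E go i))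

def CharSt (k : Int) (E : List Ev) (st : StB) : Prop :=
  st.1.items = (gosOf E).map (fun go => (go, PySem.Dict.mk (perItems E go))) ∧
  st.2.items = (PySem.List.pyRange 0 k 1).map
    (fun j => (j, PySem.Dict.mk ((gosOf E).map (fun go => (go, cntJ E go j)))))

-- generic keyed-association-list facts
lemma get?_mk_keyed {κ ν : Type} [BEq κ] [LawfulBEq κ] (F : κ → ν) (L : List κ) (x : κ) :
    (PySem.Dict.mk (L.map (fun g => (g, F g)))).get? x = if x ∈ L then some (F x) else none := by
  induction L with
  | nil => rfl
  | cons g t ih =>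
    rw [List.map_cons, PySem.Dict.get?_mk_cons]
    by_cases h : g = x
    · subst h
      simp
    · have hb : (g == x) = false := by simp [h]
      rw [hb]
      simp only [Bool.false_eq_true, if_false, ih]
      by_cases hx : x ∈ t
      · simp [hx, List.mem_cons]
      · simp [hx, List.mem_cons, Ne.symm h]

lemma contains_mk_keyed {κ ν : Type} [BEq κ] [LawfulBEq κ] (F : κ → ν) (L : List κ) (x : κ) :
    (PySem.Dict.mk (L.map (fun g => (g, F g)))).contains x = decide (x ∈ L) := by
  rw [PySem.Dict.contains_eq_isSome_get?, get?_mk_keyed]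
  by_cases hx : x ∈ L <;> simp [hx]

lemma getD_mk_keyed {κ ν : Type} [BEq κ] [LawfulBEq κ] (F : κ → ν) (L : List κ) (x : κ)
    (hx : x ∈ L) (d0 : ν) :
    (PySem.Dict.mk (L.map (fun g => (g, F g)))).getD x d0 = F x := by
  rw [PySem.Dict.getD_eq_get?_getD, get?_mk_keyed, if_pos hx]
  rfl

lemma getD_keyed {κ ν : Type} [BEq κ] [LawfulBEq κ] (F : κ → ν) (L : List κ)
    (d : PySem.Dict κ ν) (hd : d.items = L.map (fun g => (g, F g))) (x : κ)
    (hx : x ∈ L) (d0 : ν) :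
    d.getD x d0 = F x := by
  rw [PySem.Dict.ext hd]
  exact getD_mk_keyed F L x hx d0

lemma contains_keyed {κ ν : Type} [BEq κ] [LawfulBEq κ] (F : κ → ν) (L : List κ)
    (d : PySem.Dict κ ν) (hd : d.items = L.map (fun g => (g, F g))) (x : κ) :
    d.contains x = decide (x ∈ L) := by
  rw [PySem.Dict.ext hd]
  exact contains_mk_keyed F L x

lemma items_insert_keyed {κ ν : Type} [BEq κ] [LawfulBEq κ] [DecidableEq κ] (F : κ → ν)
    (L : List κ) (d : PySem.Dict κ ν) (hd : d.items = L.map (fun g => (g, F g)))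
    (a : κ) (ha : a ∈ L) (v : ν) :
    (d.insert a v).items = L.map (fun g => (g, if g = a then v else F g)) := by
  have hc : d.contains a = true := by
    rw [contains_keyed F L d hd a]
    simpa using ha
  rw [PySem.Dict.items_insert_of_contains _ _ hc, hd, List.map_map]
  apply List.map_congr_left
  intro g _
  by_cases hg : g = a
  · subst hg
    simp [Function.comp]
  · simp [Function.comp, hg]

lemma items_insert_keyed_fresh {κ ν : Type} [BEq κ] [LawfulBEq κ] (F : κ → ν)
    (L : List κ) (d : PySem.Dict κ ν) (hd : d.items = L.map (fun g => (g, F g)))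
    (a : κ) (ha : a ∉ L) (v : ν) :
    (d.insert a v).items = L.map (fun g => (g, F g)) ++ [(a, v)] := by
  have hc : d.contains a = false := by
    rw [contains_keyed F L d hd a]
    simpa using ha
  rw [PySem.Dict.items_insert_of_not_contains _ _ hc, hd]

lemma items_foldl_modify_keyed {κ ν : Type} [BEq κ] [LawfulBEq κ] [DecidableEq κ]
    (f : ν → ν) (d0 : ν) (M : List κ) (todo : List κ) (hnd : todo.Nodup)
    (hsub : ∀ a ∈ todo, a ∈ M) :
    ∀ (F : κ → ν) (d : PySem.Dict κ ν), d.items = M.map (fun g => (g, F g)) →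
      (todo.foldl (fun d a => d.modify a d0 f) d).items
        = M.map (fun g => (g, if g ∈ todo then f (F g) else F g)) := by
  induction todo with
  | nil =>
    intro F d hd
    simpa using hd
  | cons a t ih =>
    intro F d hd
    have ha : a ∈ M := hsub a List.mem_cons_self
    have hstep : (d.modify a d0 f).items
        = M.map (fun g => (g, if g = a then f (F a) else F g)) := by
      have : d.modify a d0 f = d.insert a (f (d.getD a d0)) := rfl
      rw [this, getD_keyed F M d hd a ha d0]
      exact items_insert_keyed F M d hd a ha (f (F a))
    rw [List.foldl_cons,
        ih (List.nodup_cons.mp hnd).2 (fun x hx => hsub x (List.mem_cons_of_mem a hx))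
          (fun g => if g = a then f (F a) else F g) _ hstep]
    apply List.map_congr_left
    intro g _
    by_cases hg : g = a
    · subst hg
      have hgt : g ∉ t := (List.nodup_cons.mp hnd).1
      simp [hgt]
    · by_cases hgt : g ∈ t <;> simp [hg, hgt, List.mem_cons]

-- dedup facts
lemma foldl_add_sublist {α : Type} [BEq α] (xs : List α) :
    ∀ s : List α, List.Sublist (List.foldl PySem.Set.add s xs) (s ++ xs) := by
  induction xs with
  | nil => intro s; simp
  | cons x t ih =>
    intro s
    rw [List.foldl_cons]
    refine (ih (PySem.Set.add s x)).trans ?_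
    have hadd : PySem.Set.add s x = if s.contains x then s else s ++ [x] := rfl
    have h1 : List.Sublist (PySem.Set.add s x) (s ++ [x]) := by
      rw [hadd]
      split
      · simp
      · simp
    have h2 : List.Sublist (PySem.Set.add s x ++ t) (s ++ x :: t) := by
      have := h1.append_right t
      simpa using this
    exact h2

lemma dedup_sublist {α : Type} [BEq α] (xs : List α) : List.Sublist (PySem.List.dedup xs) xs := by
  have h : PySem.List.dedup xs = List.foldl PySem.Set.add [] xs := PySem.Set.ofList_eq_foldl xs
  rw [h]
  simpa using foldl_add_sublist xs []

lemma dedup_append_singleton {α : Type} [BEq α] [LawfulBEq α] (l : List α) (x : α) :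
    PySem.List.dedup (l ++ [x])
      = if x ∈ l then PySem.List.dedup l else PySem.List.dedup l ++ [x] := by
  have h1 : PySem.List.dedup (l ++ [x]) = List.foldl PySem.Set.add [] (l ++ [x]) :=
    PySem.Set.ofList_eq_foldl _
  have h2 : PySem.List.dedup l = List.foldl PySem.Set.add [] l :=
    PySem.Set.ofList_eq_foldl _
  rw [h1, List.foldl_append, ← h2, List.foldl_cons, List.foldl_nil]
  have hadd : PySem.Set.add (PySem.List.dedup l) x
      = if (PySem.List.dedup l).contains x then PySem.List.dedup l
        else PySem.List.dedup l ++ [x] := rfl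
  rw [hadd]
  by_cases hx : x ∈ l
  · have : (PySem.List.dedup l).contains x = true := by
      rw [List.contains_iff_mem, PySem.List.mem_dedup]
      exact hx
    rw [this]
    simp [hx]
  · have : (PySem.List.dedup l).contains x = false := by
      rw [Bool.eq_false_iff, ne_eq, List.contains_iff_mem, PySem.List.mem_dedup]
      exact hx
    rw [this]
    simp [hx]

lemma nodup_dedup {α : Type} [BEq α] [LawfulBEq α] (xs : List α) :
    (PySem.List.dedup xs).Nodup := PySem.Set.nodup_ofList xs

-- counting facts about the event stream
lemma mem_isOf (E : List Ev) (go : String) (i : Int) :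
    i ∈ isOf E go ↔ (go, i) ∈ E.map (fun e => (e.1, e.2.1)) := by
  simp only [isOf, List.mem_map, List.mem_filter, beq_iff_eq]
  constructor
  · rintro ⟨e, ⟨he, hgo⟩, hi⟩
    exact ⟨e, he, by rw [hgo, hi]⟩
  · rintro ⟨e, he, hp⟩
    have h1 : e.1 = go := congrArg Prod.fst hp
    have h2 : e.2.1 = i := congrArg Prod.snd hp
    exact ⟨e, ⟨he, h1⟩, h2⟩

lemma cntI_eq_zero_of_not_mem (E : List Ev) (go : String) (i : Int) (h : i ∉ isOf E go) :
    cntI E go i = 0 := by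
  unfold cntI
  rw [List.count_eq_zero.mpr (fun hc => h ((mem_isOf E go i).mpr hc))]
  rfl

lemma cntI_append (E : List Ev) (e : Ev) (go : String) (i : Int) :
    cntI (E ++ [e]) go i = cntI E go i + (if e.1 = go ∧ e.2.1 = i then 1 else 0) := by
  unfold cntI
  rw [List.map_append, List.count_append]
  push_cast
  congr 1
  by_cases h : e.1 = go ∧ e.2.1 = i
  · obtain ⟨h1, h2⟩ := h
    simp [h1, h2]
  · rw [if_neg h]
    rw [Decidable.not_and_iff_not_or_not] at h
    rcases h with h | h <;> simp [h]

lemma cntJ_append (E : List Ev) (e : Ev) (go : String) (j : Int) :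
    cntJ (E ++ [e]) go j = cntJ E go j + (if e.1 = go ∧ e.2.2 = j then 1 else 0) := by
  unfold cntJ
  rw [List.map_append, List.count_append]
  push_cast
  congr 1
  by_cases h : e.1 = go ∧ e.2.2 = j
  · obtain ⟨h1, h2⟩ := h
    simp [h1, h2]
  · rw [if_neg h]
    rw [Decidable.not_and_iff_not_or_not] at h
    rcases h with h | h <;> simp [h]

lemma isOf_append (E : List Ev) (e : Ev) (go : String) :
    isOf (E ++ [e]) go = isOf E go ++ (if e.1 = go then [e.2.1] else []) := by
  unfold isOf
  rw [List.filter_append, List.map_append]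
  congr 1
  by_cases h : e.1 = go <;> simp [h]

lemma gosOf_append (E : List Ev) (e : Ev) :
    gosOf (E ++ [e]) = if e.1 ∈ E.map (fun e => e.1) then gosOf E else gosOf E ++ [e.1] := by
  unfold gosOf
  rw [List.map_append]
  exact dedup_append_singleton _ _

lemma mem_gosOf (E : List Ev) (go : String) : go ∈ gosOf E ↔ go ∈ E.map (fun e => e.1) := by
  unfold gosOf
  exact PySem.List.mem_dedup _ _

lemma isOf_nil_of_not_mem (E : List Ev) (go : String) (h : go ∉ E.map (fun e => e.1)) :
    isOf E go = [] := by
  unfold isOf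
  rw [List.map_eq_nil_iff, List.filter_eq_nil_iff]
  intro e he hbe
  exact h (List.mem_map.mpr ⟨e, he, by simpa using hbe⟩)

lemma perItems_append_ne (E : List Ev) (e : Ev) (go : String) (h : e.1 ≠ go) :
    perItems (E ++ [e]) go = perItems E go := by
  unfold perItems
  rw [isOf_append, if_neg h, List.append_nil]
  apply List.map_congr_left
  intro i _
  rw [cntI_append, if_neg (fun hh => h hh.1)]
  simp

lemma cntJ_append_ne (E : List Ev) (e : Ev) (go : String) (j : Int)
    (h : e.1 ≠ go ∨ e.2.2 ≠ j) : cntJ (E ++ [e]) go j = cntJ E go j := by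
  rw [cntJ_append, if_neg (by rcases h with h | h <;> exact fun hh => h (by simp [hh.1, hh.2])), add_zero]

-- the characterization survives one reference step
lemma charStep (k : Int) (E : List Ev) (e : Ev) (hj : 0 ≤ e.2.2 ∧ e.2.2 < k)
    (st : StB) (h : CharSt k E st) : CharSt k (E ++ [e]) (refStep k st e) := by
  obtain ⟨go, i, j⟩ := e
  obtain ⟨counts, lam⟩ := st
  obtain ⟨h1, h2⟩ := h
  simp only at h1 h2 hj
  have hjm : j ∈ PySem.List.pyRange 0 k 1 := PySem.List.mem_pyRange_one.mpr hj
  have hcget : counts.get? go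
      = if go ∈ gosOf E then some (PySem.Dict.mk (perItems E go)) else none := by
    rw [PySem.Dict.ext h1]
    exact get?_mk_keyed _ _ _
  simp only [refStep]
  by_cases hmem : go ∈ gosOf E
  · -- seen GO term: bump counts[go][i], bump lam[j][go]
    rw [hcget, if_pos hmem]
    simp only
    have hmemf : go ∈ E.map (fun e => e.1) := (mem_gosOf E go).mp hmem
    have hgos : gosOf (E ++ [(go, i, j)]) = gosOf E := by
      rw [gosOf_append, if_pos hmemf]
    have hperD : counts.getD go (PySem.Dict.mk []) = PySem.Dict.mk (perItems E go) :=
      getD_keyed _ _ _ h1 go hmem _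
    rw [hperD]
    constructor
    · -- counts side
      have hpitems : (PySem.Dict.mk (perItems E go)).items
          = (PySem.List.dedup (isOf E go)).map (fun i' => (i', cntI E go i')) := rfl
      have hIs : isOf (E ++ [(go, i, j)]) go = isOf E go ++ [i] := by
        rw [isOf_append, if_pos rfl]
      have hnew : (PySem.Dict.mk (perItems E go)).insert i
            ((PySem.Dict.mk (perItems E go)).getD i 0 + 1)
          = PySem.Dict.mk (perItems (E ++ [(go, i, j)]) go) := by
        apply PySem.Dict.ext
        by_cases hi : i ∈ isOf E go
        · have hiD : i ∈ PySem.List.dedup (isOf E go) := (PySem.List.mem_dedup _ _).mpr hi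
          have hgd : (PySem.Dict.mk (perItems E go)).getD i 0 = cntI E go i :=
            getD_mk_keyed _ _ _ hiD 0
          rw [hgd, items_insert_keyed _ _ _ hpitems i hiD]
          show _ = perItems (E ++ [(go, i, j)]) go
          unfold perItems
          rw [hIs, dedup_append_singleton, if_pos hi]
          apply List.map_congr_left
          intro i' hi'
          rw [cntI_append]
          by_cases hii : i' = i
          · subst hii
            simp
          · rw [if_neg hii, if_neg (fun hh : _ ∧ _ => hii hh.2.symm), add_zero]
        · have hiD : i ∉ PySem.List.dedup (isOf E go) := fun hc => hi ((PySem.List.mem_dedup _ _).mp hc)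
          have hgd : (PySem.Dict.mk (perItems E go)).getD i 0 = 0 := by
            rw [PySem.Dict.getD_eq_get?_getD,
              show (PySem.Dict.mk (perItems E go)).get? i = _ from
                get?_mk_keyed (fun i' => cntI E go i') (PySem.List.dedup (isOf E go)) i,
              if_neg hiD]
            rfl
          rw [hgd, items_insert_keyed_fresh _ _ _ hpitems i hiD]
          show _ = perItems (E ++ [(go, i, j)]) go
          unfold perItems
          rw [hIs, dedup_append_singleton, if_neg hi, List.map_append]
          congr 1
          · apply List.map_congr_left
            intro i' hi'
            have hii : i' ≠ i := fun hh => hi (hh ▸ (PySem.List.mem_dedup _ _).mp hi')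
            rw [cntI_append, if_neg (fun hh => hii hh.2.symm), add_zero]
          · rw [List.map_singleton, cntI_append, if_pos ⟨rfl, rfl⟩,
              cntI_eq_zero_of_not_mem E go i hi, zero_add]
      rw [hnew, items_insert_keyed _ _ _ h1 go hmem, hgos]
      apply List.map_congr_left
      intro g _
      by_cases hg : g = go
      · subst hg
        simp
      · rw [if_neg hg, perItems_append_ne E _ g (by simpa using Ne.symm hg)]
    · -- lam side
      have hstep : lam.modify j (PySem.Dict.mk [])
            (fun inner => inner.modify go 0 (· + 1))
          = lam.insert j
            ((lam.getD j (PySem.Dict.mk [])).modify go 0 (· + 1)) := rfl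
      have hlamD : lam.getD j (PySem.Dict.mk [])
          = PySem.Dict.mk ((gosOf E).map (fun g => (g, cntJ E g j))) :=
        getD_keyed _ _ _ h2 j hjm _
      have hinner : (PySem.Dict.mk ((gosOf E).map (fun g => (g, cntJ E g j)))).modify go 0 (· + 1)
          = PySem.Dict.mk ((gosOf (E ++ [(go, i, j)])).map
              (fun g => (g, cntJ (E ++ [(go, i, j)]) g j))) := by
        apply PySem.Dict.ext
        have hmod : (PySem.Dict.mk ((gosOf E).map (fun g => (g, cntJ E g j)))).modify go 0 (· + 1)
            = (PySem.Dict.mk ((gosOf E).map (fun g => (g, cntJ E g j)))).insert go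
                ((PySem.Dict.mk ((gosOf E).map (fun g => (g, cntJ E g j)))).getD go 0 + 1) := rfl
        rw [hmod, getD_mk_keyed _ _ _ hmem 0, items_insert_keyed _ _ _ rfl go hmem, hgos]
        apply List.map_congr_left
        intro g _
        by_cases hg : g = go
        · subst hg
          rw [if_pos rfl, cntJ_append, if_pos ⟨rfl, rfl⟩]
        · rw [if_neg hg, cntJ_append_ne _ _ _ _ (Or.inl (by simpa using Ne.symm hg))]
      rw [hstep, hlamD, hinner, items_insert_keyed _ _ _ h2 j hjm]
      apply List.map_congr_left
      intro j' _
      by_cases hj' : j' = j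
      · subst hj'
        simp
      · rw [if_neg hj']
        congr 1
        congr 1
        rw [hgos]
        apply List.map_congr_left
        intro g _
        rw [cntJ_append_ne _ _ _ _ (Or.inr (by simpa using Ne.symm hj'))]
  · -- new GO term: create counts[go] = {i: 1}, zero-fill lam[·][go], then bump lam[j][go]
    rw [hcget, if_neg hmem]
    simp only
    have hmemf : go ∉ E.map (fun e => e.1) := fun hc => hmem ((mem_gosOf E go).mpr hc)
    have hgos : gosOf (E ++ [(go, i, j)]) = gosOf E ++ [go] := by
      rw [gosOf_append, if_neg hmemf]
    have hIsNil : isOf E go = [] := isOf_nil_of_not_mem E go hmemf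
    have hcnt0 : cntI E go i = 0 := cntI_eq_zero_of_not_mem E go i (by rw [hIsNil]; simp)
    constructor
    · -- counts side
      have hb1 : (counts.insert go (PySem.Dict.mk [])).getD go (PySem.Dict.mk [])
          = PySem.Dict.mk [] := PySem.Dict.getD_insert_self _ _ _ _
      rw [hb1]
      have hb2 : ((PySem.Dict.mk ([] : List (Int × Int))).insert i
          ((PySem.Dict.mk ([] : List (Int × Int))).getD i 0 + 1)) = PySem.Dict.mk [(i, 1)] := rfl
      rw [hb2, PySem.Dict.insert_insert_self,
        items_insert_keyed_fresh _ _ _ h1 go hmem, hgos, List.map_append]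
      congr 1
      · apply List.map_congr_left
        intro g hg
        have hgne : g ≠ go := fun hh => hmem (hh ▸ hg)
        rw [perItems_append_ne E _ g (Ne.symm hgne)]
      · rw [List.map_singleton]
        congr 2
        unfold perItems
        rw [isOf_append, if_pos rfl, hIsNil, List.nil_append]
        have hded : PySem.List.dedup [i] = [i] := rfl
        rw [hded, List.map_singleton, cntI_append, if_pos ⟨rfl, rfl⟩, hcnt0, zero_add]
    · -- lam side: zero-fill every position, then bump position j
      have hfill : ((PySem.List.pyRange 0 k 1).foldl
            (fun g intel => g.modify intel (PySem.Dict.mk []) (fun inner => inner.insert go 0)) lam).items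
          = (PySem.List.pyRange 0 k 1).map (fun j' => (j',
              PySem.Dict.mk ((gosOf E ++ [go]).map (fun g => (g, cntJ E g j'))))) := by
        rw [items_foldl_modify_keyed (fun inner => inner.insert go 0) (PySem.Dict.mk [])
          (PySem.List.pyRange 0 k 1) (PySem.List.pyRange 0 k 1)
          (PySem.List.nodup_pyRange_one 0 k) (fun a ha => ha) _ lam h2]
        apply List.map_congr_left
        intro j' hj'
        rw [if_pos hj']
        congr 1
        apply PySem.Dict.ext
        rw [items_insert_keyed_fresh _ _ _ rfl go hmem, List.map_append]
        have hcj0 : cntJ E go j' = 0 := by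
          unfold cntJ
          rw [List.count_eq_zero.mpr, Int.natCast_zero]
          intro hc
          rcases List.mem_map.mp hc with ⟨e', he', hp⟩
          exact hmemf (List.mem_map.mpr ⟨e', he', congrArg Prod.fst hp⟩)
        rw [List.map_singleton, hcj0]
      have hstep : ∀ d : PySem.Dict Int (PySem.Dict String Int),
          d.modify j (PySem.Dict.mk []) (fun inner => inner.modify go 0 (· + 1))
          = d.insert j ((d.getD j (PySem.Dict.mk [])).modify go 0 (· + 1)) := fun _ => rfl
      rw [hstep, getD_keyed _ _ _ hfill j hjm,
        items_insert_keyed _ _ _ hfill j hjm]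
      have hgomem : go ∈ gosOf E ++ [go] := List.mem_append.mpr (Or.inr (by simp))
      apply List.map_congr_left
      intro j' _
      by_cases hj' : j' = j
      · subst hj'
        rw [if_pos rfl]
        congr 1
        apply PySem.Dict.ext
        have hmod : (PySem.Dict.mk ((gosOf E ++ [go]).map (fun g => (g, cntJ E g j')))).modify go 0 (· + 1)
            = (PySem.Dict.mk ((gosOf E ++ [go]).map (fun g => (g, cntJ E g j')))).insert go
                ((PySem.Dict.mk ((gosOf E ++ [go]).map (fun g => (g, cntJ E g j')))).getD go 0 + 1) := rfl
        rw [hmod, getD_mk_keyed _ _ _ hgomem 0, items_insert_keyed _ _ _ rfl go hgomem, hgos]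
        apply List.map_congr_left
        intro g _
        by_cases hg : g = go
        · subst hg
          rw [if_pos rfl, cntJ_append, if_pos ⟨rfl, rfl⟩]
        · rw [if_neg hg, cntJ_append_ne _ _ _ _ (Or.inl (by simpa using Ne.symm hg))]
      · rw [if_neg hj', hgos]
        congr 1
        congr 1
        apply List.map_congr_left
        intro g _
        rw [cntJ_append_ne _ _ _ _ (Or.inr (by simpa using Ne.symm hj'))]

lemma charFold (k : Int) (E : List Ev) (hj : ∀ e ∈ E, 0 ≤ e.2.2 ∧ e.2.2 < k) :
    CharSt k E (E.foldl (refStep k)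
      ((PySem.Dict.mk ([] : List (String × PySem.Dict Int Int))), lam0 k)) := by
  induction E using List.reverseRecOn with
  | nil =>
    constructor
    · rfl
    · show (lam0 k).items = _
      unfold lam0
      rw [PySem.Dict.items_foldl_insert_fresh (PySem.List.pyRange 0 k 1) (fun a => a)
        (fun _ => PySem.Dict.mk []) (PySem.Dict.mk []) (fun a _ => rfl)
        (by simpa using PySem.List.nodup_pyRange_one 0 k)]
      simp [gosOf]
  | append_singleton E e ih =>
    rw [List.foldl_append, List.foldl_cons, List.foldl_nil]
    exact charStep k E e (hj e (List.mem_append.mpr (Or.inr (by simp))))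
      _ (ih (fun x hx => hj x (List.mem_append.mpr (Or.inl hx))))

-- ---------- facts about the event stream itself ----------

lemma mem_enumerate {α : Type} (l : List α) (s : Int) (p : Int × α)
    (hp : p ∈ PySem.List.enumerate l s) : s ≤ p.1 ∧ p.1 < s + l.length ∧ p.2 ∈ l := by
  induction l generalizing s with
  | nil => exact absurd hp List.not_mem_nil
  | cons a t ih =>
    rw [PySem.List.enumerate_cons] at hp
    rcases List.mem_cons.mp hp with hp | hp
    · subst hp
      refine ⟨le_refl s, ?_, by simp⟩
      have : (0 : Int) < (t.length : Int) + 1 := by positivity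
      simp only [List.length_cons]
      push_cast
      omega
    · obtain ⟨ih1, ih2, ih3⟩ := ih (s + 1) hp
      refine ⟨by omega, ?_, List.mem_cons_of_mem a ih3⟩
      simp only [List.length_cons]
      push_cast
      omega

lemma ev_j_bound (pgo : List (Int × List (String × List String))) (aligs : List (List String))
    (k : Int) (hpre : Pre_go_tower_calc pgo aligs k) :
    ∀ e ∈ evStream pgo aligs, 0 ≤ e.2.2 ∧ e.2.2 < k := by
  intro e he
  rw [evStream, List.mem_flatMap] at he
  obtain ⟨ia, hia, he⟩ := he
  rw [rowEvents, List.mem_flatMap] at he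
  obtain ⟨jp, hjp, he⟩ := he
  simp only at he
  split at he
  case isFalse => exact absurd he List.not_mem_nil
  case isTrue hcond =>
    obtain ⟨hne, hcont⟩ := hcond
    rcases List.mem_map.mp he with ⟨go, hgo, rfl⟩
    simp only
    have hrow : ia.2 ∈ aligs := (mem_enumerate aligs 0 ia hia).2.2
    have hjp0 : 0 ≤ jp.1 := by
      have := (mem_enumerate ia.2 0 jp hjp).1
      omega
    have hp := hpre ia.2 hrow jp hjp hne
    unfold preCell at hp
    split at hp
    case h_1 => exact absurd hp (by simp)
    case h_2 d' heq =>
      have hdd : (PySem.Dict.mk pgo).getD jp.1 [] = d' :=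
        PySem.Dict.getD_of_get?_eq_some _ _ heq
      rw [hdd] at hcont hgo
      split at hp
      case h_1 heq2 =>
        rw [PySem.Dict.contains_eq_isSome_get?, heq2] at hcont
        exact absurd hcont (by simp)
      case h_2 gos heq2 =>
        have hgd : (PySem.Dict.mk d').getD jp.2 [] = gos :=
          PySem.Dict.getD_of_get?_eq_some _ _ heq2
        rw [hgd] at hgo
        have hnem : gos.isEmpty = false := by
          cases gos with
          | nil => exact absurd hgo List.not_mem_nil
          | cons _ _ => rfl
        rw [hnem] at hp
        simp only [Bool.false_or, decide_eq_true_eq] at hp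
        exact ⟨hjp0, hp⟩

lemma ev_i_aux (pgoD : PySem.Dict Int (List (String × List String))) (als : List (List String)) :
    ∀ s : Int,
      (∀ e ∈ (PySem.List.enumerate als s).flatMap (fun ia => rowEvents pgoD ia.1 ia.2),
        s ≤ e.2.1 ∧ e.2.1 < s + als.length) ∧
      (((PySem.List.enumerate als s).flatMap
          (fun ia => rowEvents pgoD ia.1 ia.2)).map (fun e => e.2.1)).Pairwise (· ≤ ·) := by
  induction als with
  | nil =>
    intro s
    constructor
    · intro e he
      exact absurd he List.not_mem_nil
    · exact List.Pairwise.nil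
  | cons a t ih =>
    intro s
    rw [PySem.List.enumerate_cons]
    simp only [List.flatMap_cons, List.map_append]
    have hhead : ∀ x ∈ (rowEvents pgoD s a).map (fun e => e.2.1), x = s := by
      intro x hx
      rcases List.mem_map.mp hx with ⟨e, he, rfl⟩
      exact rowEvents_i pgoD s a e he
    obtain ⟨ihb, ihp⟩ := ih (s + 1)
    constructor
    · intro e he
      rcases List.mem_append.mp he with he | he
      · have := rowEvents_i pgoD s a e he
        simp only [List.length_cons]
        push_cast
        omega
      · have := ihb e he
        simp only [List.length_cons]
        push_cast
        omega
    · rw [List.pairwise_append]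
      refine ⟨List.pairwise_of_forall_mem_list ?_, ihp, ?_⟩
      · intro x hx y hy
        rw [hhead x hx, hhead y hy]
      · intro x hx y hy
        rcases List.mem_map.mp hy with ⟨e, he, rfl⟩
        have := (ihb e he).1
        rw [hhead x hx]
        omega

lemma ev_i_bound (pgo : List (Int × List (String × List String))) (aligs : List (List String)) :
    ∀ e ∈ evStream pgo aligs, 0 ≤ e.2.1 ∧ e.2.1 < (aligs.length : Int) := by
  intro e he
  have h := (ev_i_aux (PySem.Dict.mk pgo) aligs 0).1 e he
  omega

lemma ev_i_pairwise (pgo : List (Int × List (String × List String))) (aligs : List (List String)) :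
    ((evStream pgo aligs).map (fun e => e.2.1)).Pairwise (· ≤ ·) :=
  (ev_i_aux (PySem.Dict.mk pgo) aligs 0).2

-- a monotone bounded integer list: its first-occurrence dedup is the filtered range
lemma filter_range_eq_dedup (n : Nat) (L : List Int) (hmono : L.Pairwise (· ≤ ·))
    (hbnd : ∀ x ∈ L, 0 ≤ x ∧ x < (n : Int)) :
    (PySem.List.pyRange 0 (n : Int) 1).filter (fun i => decide (i ∈ L)) = PySem.List.dedup L := by
  have hsub : List.Sublist (PySem.List.dedup L) L := dedup_sublist L
  have hd_nodup : (PySem.List.dedup L).Nodup := nodup_dedup L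
  have hd_pw : (PySem.List.dedup L).Pairwise (· < ·) := by
    have h1 := hmono.sublist hsub
    have h2 : (PySem.List.dedup L).Pairwise (· ≠ ·) := hd_nodup
    exact (h1.and h2).imp (fun h => lt_of_le_of_ne h.1 h.2)
  have hr_pw : (PySem.List.pyRange 0 (n : Int) 1).Pairwise (· < ·) := by
    rw [PySem.List.pyRange_zero_natCast]
    exact List.pairwise_map.mpr (List.pairwise_lt_range.imp (by
      intro a b hab
      exact_mod_cast hab))
  have hf_pw : ((PySem.List.pyRange 0 (n : Int) 1).filter
      (fun i => decide (i ∈ L))).Pairwise (· < ·) := hr_pw.filter _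
  have hf_nodup : ((PySem.List.pyRange 0 (n : Int) 1).filter
      (fun i => decide (i ∈ L))).Nodup := hf_pw.imp ne_of_lt
  have hfin : ((PySem.List.pyRange 0 (n : Int) 1).filter (fun i => decide (i ∈ L))).toFinset
      = (PySem.List.dedup L).toFinset := by
    apply Finset.ext
    intro x
    simp only [List.mem_toFinset, List.mem_filter, PySem.List.mem_pyRange_one,
      decide_eq_true_eq, PySem.List.mem_dedup]
    constructor
    · exact fun h => h.2
    · intro h
      exact ⟨hbnd x h, h⟩
  exact List.eq_of_perm_of_sorted (fun a b _ _ h1 h2 => by omega) hf_pw hd_pw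
    (List.perm_of_nodup_nodup_toFinset_eq hf_nodup hd_nodup hfin)

lemma isOf_pairwise (pgo : List (Int × List (String × List String))) (aligs : List (List String))
    (go : String) : (isOf (evStream pgo aligs) go).Pairwise (· ≤ ·) := by
  have h := ev_i_pairwise pgo aligs
  unfold isOf
  have hsub : List.Sublist
      (((evStream pgo aligs).filter (fun e => e.1 == go)).map (fun e => e.2.1))
      ((evStream pgo aligs).map (fun e => e.2.1)) :=
    (List.filter_sublist (l := evStream pgo aligs)).map _
  exact h.sublist hsub

lemma isOf_bound (pgo : List (Int × List (String × List String))) (aligs : List (List String))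
    (go : String) : ∀ x ∈ isOf (evStream pgo aligs) go, 0 ≤ x ∧ x < (aligs.length : Int) := by
  intro x hx
  rcases List.mem_map.mp hx with ⟨e, he, rfl⟩
  exact ev_i_bound pgo aligs e (List.mem_of_mem_filter he)

-- ===== VERDICT (by name: the statement is the Claim_ definition above) =====
theorem go_tower_calc_spec : Claim_equal_go_tower_calc := by
  intro pgo aligs k _ hpre
  unfold Spec_go_tower_calc
  rw [A_eq]
  simp only [go_tower_calc_alt]
  rw [show ((PySem.List.enumerate aligs).flatMap (fun ia =>
      (PySem.List.enumerate ia.2).flatMap (fun jp =>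
        let d := PySem.Dict.mk ((PySem.Dict.mk pgo).getD jp.1 [])
        if jp.2 ≠ "_" ∧ d.contains jp.2 = true
        then (d.getD jp.2 []).map (fun go => (go, ia.1, jp.1))
        else []))) = evStream pgo aligs from rfl]
  obtain ⟨hc1, hc2⟩ := charFold k (evStream pgo aligs) (ev_j_bound pgo aligs k hpre)
  refine Prod.ext ?_ ?_
  · -- first table
    simp only
    rw [hc1, List.map_map]
    apply List.map_congr_left
    intro go _
    simp only [Function.comp]
    congr 1
    have hvals : (PySem.Dict.mk (perItems (evStream pgo aligs) go)).values
        = (PySem.List.dedup (isOf (evStream pgo aligs) go)).map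
            (fun i => cntI (evStream pgo aligs) go i) := by
      show (perItems (evStream pgo aligs) go).map (fun p => p.2) = _
      unfold perItems
      rw [List.map_map]
      rfl
    rw [hvals]
    have hfilter : (PySem.List.pyRange 0 (aligs.length : Int) 1).filter
          (fun i => (PySem.Dict.counter ((evStream pgo aligs).map
            (fun e => (e.1, e.2.1)))).contains (go, i))
        = (PySem.List.pyRange 0 (aligs.length : Int) 1).filter
          (fun i => decide (i ∈ isOf (evStream pgo aligs) go)) := by
      apply List.filter_congr
      intro i _
      rw [PySem.Dict.contains_counter, Bool.eq_iff_iff]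
      simp only [List.contains_iff_mem, decide_eq_true_eq]
      exact (mem_isOf _ _ _).symm
    rw [hfilter, filter_range_eq_dedup aligs.length _ (isOf_pairwise pgo aligs go)
      (isOf_bound pgo aligs go)]
    apply List.map_congr_left
    intro i _
    rw [PySem.Dict.getD_counter]
    rfl
  · -- second table
    simp only
    rw [hc2, List.map_map]
    apply List.map_congr_left
    intro j _
    simp only [Function.comp]
    congr 1
    show ((gosOf (evStream pgo aligs)).map
        (fun go => (go, cntJ (evStream pgo aligs) go j))) = _
    apply List.map_congr_left
    intro go _
    rw [PySem.Dict.getD_counter]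
    rfl
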